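-- pv_equiv track=rewrite | github.com/WilsonArim/Torre | core/orquestrador/file_access_guard.py | validar_formato_relatorio
-- ===== SOURCE A (Python) =====
-- from typing import Tuple
--
-- def validar_formato_relatorio(conteudo: str) -> Tuple[bool, str]:
--     """
--     Valida se um relatório segue o formato obrigatório.
--
--     Returns:
--         Tuple[bool, str]: (valido, mensagem)
--     """
--     linhas = conteudo.split("\n")
--
--     # Verificar início: PIPELINE/FORA_PIPELINE
--     tem_inicio = False
--     for linha in linhas[:10]:  # Verificar primeiras 10 linhas
--         if "PIPELINE/FORA_PIPELINE" in linha.upper() or "**PIPELINE/FORA_PIPELINE**" in linha.upper():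
--             tem_inicio = True
--             break
--
--     # Verificar fim: COMANDO A EXECUTAR
--     tem_fim = False
--     for linha in reversed(linhas[-10:]):  # Verificar últimas 10 linhas
--         if "COMANDO A EXECUTAR" in linha.upper() or "**COMANDO A EXECUTAR**" in linha.upper():
--             tem_fim = True
--             break
--
--     if not tem_inicio:
--         return False, "Relatório não contém identificação PIPELINE/FORA_PIPELINE no início"
--
--     if not tem_fim:
--         return False, "Relatório não contém COMANDO A EXECUTAR no fim"
--
--     return True, "OK"
-- ===== SOURCE B (Python) =====
-- from typing import Tuple
--
-- def validar_formato_relatorio(conteudo: str) -> Tuple[bool, str]: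
--     """
--     Valida se um relatório segue o formato obrigatório.
--
--     Returns:
--         Tuple[bool, str]: (valido, mensagem)
--     """
--     linhas = conteudo.split("\n")
--     # The markers contain no newline, so one substring search over the joined
--     # (and uppercased) block of lines finds exactly what a per-line scan finds.
--     head = "\n".join(linhas[:10]).upper()
--     tail = "\n".join(linhas[-10:]).upper()
--
--     tem_inicio = "PIPELINE/FORA_PIPELINE" in head
--     tem_fim = "COMANDO A EXECUTAR" in tail
--
--     if not tem_inicio:
--         return False, "Relatório não contém identificação PIPELINE/FORA_PIPELINE no início"
--
--     if not tem_fim: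
--         return False, "Relatório não contém COMANDO A EXECUTAR no fim"
--
--     return True, "OK"
-- ===== Notes on version B (the rewrite author's own statement) =====
-- stated objective: simpler
-- what changed: Replaces the two per-line scan loops (with break flags and a redundant '**marker**' test subsumed by the plain marker test) by a single substring search over the joined-and-uppercased head/tail block of lines; correct because neither marker contains a newline.
import Mathlib
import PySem

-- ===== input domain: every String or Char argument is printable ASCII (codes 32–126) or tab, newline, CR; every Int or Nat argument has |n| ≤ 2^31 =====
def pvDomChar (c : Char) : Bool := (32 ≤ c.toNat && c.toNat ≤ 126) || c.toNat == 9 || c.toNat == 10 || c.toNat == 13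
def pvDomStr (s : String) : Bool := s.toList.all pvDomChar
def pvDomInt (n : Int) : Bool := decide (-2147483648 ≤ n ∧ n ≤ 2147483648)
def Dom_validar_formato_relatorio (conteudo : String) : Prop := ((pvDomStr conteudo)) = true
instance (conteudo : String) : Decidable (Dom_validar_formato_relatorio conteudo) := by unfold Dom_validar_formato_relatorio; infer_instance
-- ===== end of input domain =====

-- B replaces A's two per-line scan loops by one substring search over the joined,
-- uppercased head/tail block (objective: simpler); return values agree on all inputs.

-- ===== PORT A =====
-- 'if "PIPELINE/FORA_PIPELINE" in linha.upper() or "**PIPELINE/FORA_PIPELINE**" in linha.upper()'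
def pvLinhaInicio (linha : List Char) : Bool :=
  PySem.Chars.isIn "PIPELINE/FORA_PIPELINE".toList (PySem.Chars.upper linha) ||
  PySem.Chars.isIn "**PIPELINE/FORA_PIPELINE**".toList (PySem.Chars.upper linha)

-- 'if "COMANDO A EXECUTAR" in linha.upper() or "**COMANDO A EXECUTAR**" in linha.upper()'
def pvLinhaFim (linha : List Char) : Bool :=
  PySem.Chars.isIn "COMANDO A EXECUTAR".toList (PySem.Chars.upper linha) ||
  PySem.Chars.isIn "**COMANDO A EXECUTAR**".toList (PySem.Chars.upper linha)

-- the 'for … if …: flag = True; break' loop: walks the lines, stops at the first hit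
def pvLoopInicio : List (List Char) → Bool
  | [] => false
  | l :: rest => if pvLinhaInicio l then true else pvLoopInicio rest

def pvLoopFim : List (List Char) → Bool
  | [] => false
  | l :: rest => if pvLinhaFim l then true else pvLoopFim rest

def validar_formato_relatorio (conteudo : String) : Bool × String :=
  -- conteudo.split("\n"): sep ≠ "", so Chars.splitOn is exact
  let linhas := PySem.Chars.splitOn conteudo.toList ['\n']
  let tem_inicio := pvLoopInicio (PySem.List.slice linhas none (some 10))
  let tem_fim := pvLoopFim (PySem.List.slice linhas (some (-10)) none).reverse
  if !tem_inicio then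
    (false, "Relatório não contém identificação PIPELINE/FORA_PIPELINE no início")
  else if !tem_fim then
    (false, "Relatório não contém COMANDO A EXECUTAR no fim")
  else
    (true, "OK")

-- ===== PORT B =====
def validar_formato_relatorio_alt (conteudo : String) : Bool × String :=
  let linhas := PySem.Chars.splitOn conteudo.toList ['\n']
  let head := PySem.Chars.upper (PySem.Chars.join ['\n'] (PySem.List.slice linhas none (some 10)))
  let tail := PySem.Chars.upper (PySem.Chars.join ['\n'] (PySem.List.slice linhas (some (-10)) none))
  let tem_inicio := PySem.Chars.isIn "PIPELINE/FORA_PIPELINE".toList head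
  let tem_fim := PySem.Chars.isIn "COMANDO A EXECUTAR".toList tail
  if !tem_inicio then
    (false, "Relatório não contém identificação PIPELINE/FORA_PIPELINE no início")
  else if !tem_fim then
    (false, "Relatório não contém COMANDO A EXECUTAR no fim")
  else
    (true, "OK")

-- ===== PRECONDITION & SPEC =====
def Spec_validar_formato_relatorio (conteudo : String) (out : Bool × String) : Prop := out = validar_formato_relatorio_alt conteudo
instance (conteudo : String) (out : Bool × String) : Decidable (Spec_validar_formato_relatorio conteudo out) := by unfold Spec_validar_formato_relatorio; infer_instance

-- ===== CLAIM (what is proved, stated in full; the proofs are below) =====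
def Claim_equal_validar_formato_relatorio : Prop := ∀ (conteudo : String), Dom_validar_formato_relatorio conteudo → Spec_validar_formato_relatorio conteudo (validar_formato_relatorio conteudo)

-- ===== LEMMAS AND PROOFS =====

-- a needle not containing c is a prefix of a ++ c :: b iff it is a prefix of a
lemma prefix_append_cons {n a b : List Char} {c : Char} (hc : c ∉ n) :
    n <+: a ++ c :: b ↔ n <+: a := by
  induction n generalizing a with
  | nil => simp
  | cons x n' ih =>
    cases a with
    | nil =>
      simp only [List.nil_append, List.cons_prefix_cons]
      constructor
      · rintro ⟨rfl, -⟩; exact (hc (by simp)).elim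
      · intro h; exact absurd (List.prefix_nil.mp h) (by simp)
    | cons y a' =>
      simp only [List.cons_append, List.cons_prefix_cons]
      exact and_congr_right fun _ => ih (fun hm => hc (List.mem_cons_of_mem _ hm))

-- a needle not containing c is an infix of a ++ c :: b iff it is an infix of a or of b
lemma infix_append_cons {n : List Char} {c : Char} (hc : c ∉ n) (a b : List Char) :
    n <:+: a ++ c :: b ↔ n <:+: a ∨ n <:+: b := by
  induction a with
  | nil =>
    simp only [List.nil_append, List.infix_cons_iff]
    constructor
    · rintro (hp | hi)
      · have h0 : n <+: ([] : List Char) := (prefix_append_cons (a := []) hc).mp hp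
        have : n = [] := List.prefix_nil.mp h0
        subst this; exact Or.inl List.nil_infix
      · exact Or.inr hi
    · rintro (hi | hi)
      · have : n = [] := List.eq_nil_of_infix_nil hi
        subst this; exact Or.inl List.nil_prefix
      · exact Or.inr hi
  | cons y a' ih =>
    constructor
    · intro h
      rcases (List.infix_cons_iff).mp h with hp | hi
      · have : n <+: y :: a' := by
          have := (prefix_append_cons (a := y :: a') hc).mp (by simpa using hp)
          exact this
        exact Or.inl this.isInfix
      · rcases ih.mp hi with h1 | h2
        · exact Or.inl (h1.trans (List.infix_cons List.infix_rfl))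
        · exact Or.inr h2
    · rintro (hi | hi)
      · exact hi.trans ((List.prefix_append _ _).isInfix)
      · exact hi.trans ((List.suffix_append_of_suffix (List.suffix_cons _ _)).isInfix)

-- searching a newline-free nonempty needle in the '\n'-joined block = searching each chunk
lemma isIn_join_eq_any (n : List Char) (hne : n ≠ []) (hc : '\n' ∉ n) :
    ∀ ls : List (List Char),
      PySem.Chars.isIn n (PySem.Chars.join ['\n'] ls) = ls.any (fun l => PySem.Chars.isIn n l)
  | [] => by
    rw [Bool.eq_iff_iff]
    simp [PySem.Chars.isIn_iff_infix, PySem.Chars.join, List.intercalate, hne]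
  | [a] => by
    rw [Bool.eq_iff_iff]
    simp [PySem.Chars.isIn_iff_infix, PySem.Chars.join, List.intercalate]
  | a :: q :: rest => by
    rw [Bool.eq_iff_iff]
    rw [PySem.Chars.join_cons_cons]
    have hrec := isIn_join_eq_any n hne hc (q :: rest)
    rw [Bool.eq_iff_iff] at hrec
    simp only [PySem.Chars.isIn_iff_infix] at hrec ⊢
    have : a ++ ['\n'] ++ PySem.Chars.join ['\n'] (q :: rest)
        = a ++ '\n' :: PySem.Chars.join ['\n'] (q :: rest) := by simp
    rw [this, infix_append_cons hc]
    simp [hrec, PySem.Chars.isIn_iff_infix]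

-- upper is a character map, and '\n' is fixed by it: it distributes over the join
lemma upper_join (ls : List (List Char)) :
    PySem.Chars.upper (PySem.Chars.join ['\n'] ls)
      = PySem.Chars.join ['\n'] (ls.map PySem.Chars.upper) := by
  induction ls with
  | nil => rfl
  | cons a t ih =>
    have happ : ∀ x y : List Char,
        PySem.Chars.upper (x ++ y) = PySem.Chars.upper x ++ PySem.Chars.upper y := by
      intro x y; simp [PySem.Chars.upper]
    cases t with
    | nil => simp [PySem.Chars.join, List.intercalate]
    | cons q r =>
      simp only [List.map_cons, PySem.Chars.join_cons_cons]
      rw [happ, happ, ih]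
      rfl

-- the two membership tests of A's line predicate collapse to the first (the second needle contains the first)
lemma linhaInicio_eq (l : List Char) :
    pvLinhaInicio l = PySem.Chars.isIn "PIPELINE/FORA_PIPELINE".toList (PySem.Chars.upper l) := by
  unfold pvLinhaInicio
  cases h : PySem.Chars.isIn "PIPELINE/FORA_PIPELINE".toList (PySem.Chars.upper l) with
  | true => simp
  | false =>
    simp only [Bool.false_or]
    cases h2 : PySem.Chars.isIn "**PIPELINE/FORA_PIPELINE**".toList (PySem.Chars.upper l) with
    | false => rfl
    | true =>
      exfalso
      have hsub : "PIPELINE/FORA_PIPELINE".toList <:+: "**PIPELINE/FORA_PIPELINE**".toList := by decide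
      have := hsub.trans ((PySem.Chars.isIn_iff_infix _ _).mp h2)
      rw [← PySem.Chars.isIn_iff_infix, h] at this
      exact Bool.false_ne_true this

lemma linhaFim_eq (l : List Char) :
    pvLinhaFim l = PySem.Chars.isIn "COMANDO A EXECUTAR".toList (PySem.Chars.upper l) := by
  unfold pvLinhaFim
  cases h : PySem.Chars.isIn "COMANDO A EXECUTAR".toList (PySem.Chars.upper l) with
  | true => simp
  | false =>
    simp only [Bool.false_or]
    cases h2 : PySem.Chars.isIn "**COMANDO A EXECUTAR**".toList (PySem.Chars.upper l) with
    | false => rfl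
    | true =>
      exfalso
      have hsub : "COMANDO A EXECUTAR".toList <:+: "**COMANDO A EXECUTAR**".toList := by decide
      have := hsub.trans ((PySem.Chars.isIn_iff_infix _ _).mp h2)
      rw [← PySem.Chars.isIn_iff_infix, h] at this
      exact Bool.false_ne_true this

-- A's break-loops are List.any of their line predicate
lemma loopInicio_eq_any (ls : List (List Char)) : pvLoopInicio ls = ls.any pvLinhaInicio := by
  induction ls with
  | nil => rfl
  | cons l t ih => simp only [pvLoopInicio, List.any_cons]; split_ifs with h <;> simp [h, ih]

lemma loopFim_eq_any (ls : List (List Char)) : pvLoopFim ls = ls.any pvLinhaFim := by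
  induction ls with
  | nil => rfl
  | cons l t ih => simp only [pvLoopFim, List.any_cons]; split_ifs with h <;> simp [h, ih]

-- the two flags agree
lemma flag_eq (needle : List Char) (hne : needle ≠ []) (hc : '\n' ∉ needle) (ls : List (List Char)) :
    ls.any (fun l => PySem.Chars.isIn needle (PySem.Chars.upper l))
      = PySem.Chars.isIn needle (PySem.Chars.upper (PySem.Chars.join ['\n'] ls)) := by
  rw [upper_join, isIn_join_eq_any needle hne hc, List.any_map]
  rfl

-- ===== VERDICT (by name: the statement is the Claim_ definition above) =====
theorem validar_formato_relatorio_spec : Claim_equal_validar_formato_relatorio := by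
  intro conteudo _
  unfold Spec_validar_formato_relatorio validar_formato_relatorio validar_formato_relatorio_alt
  simp only [loopInicio_eq_any, loopFim_eq_any, List.any_reverse]
  simp only [funext linhaInicio_eq, funext linhaFim_eq]
  rw [flag_eq "PIPELINE/FORA_PIPELINE".toList (by decide) (by decide),
      flag_eq "COMANDO A EXECUTAR".toList (by decide) (by decide)]
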